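-- pv_equiv track=rewrite | github.com/Vaidnyani19/DDR-Report-Generator | extractor.py | get_thermal_images_only
-- ===== SOURCE A (Python) =====
-- def get_thermal_images_only(image_list):
--     """
--     From thermal PDF images, separate thermal scans from real photos.
--     In Thermal_Images.pdf each page has 2 images:
--     - First image = thermal heat map (usually wider/landscape)
--     - Second image = real photo of location
--     Returns two lists: thermal_maps, real_photos
--     """
--     thermal_images = [img for img in image_list if img["source"] == "thermal"]
--
--     thermal_maps = []
--     real_photos = []
--
--     # Group by page - first image per page = thermal map, second = real photo
--     pages = {}
--     for img in thermal_images: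
--         p = img["page"]
--         if p not in pages:
--             pages[p] = []
--         pages[p].append(img)
--
--     for page_num in sorted(pages.keys()):
--         imgs = pages[page_num]
--         if len(imgs) >= 1:
--             thermal_maps.append(imgs[0])
--         if len(imgs) >= 2:
--             real_photos.append(imgs[1])
--
--     return thermal_maps, real_photos
-- ===== SOURCE B (Python) =====
-- def get_thermal_images_only(image_list):
--     """
--     From thermal PDF images, separate thermal scans from real photos.
--     Stable sort by page, then one consecutive-run scan: the first image
--     of each page-run is the thermal map, the second the real photo.
--     Returns two lists: thermal_maps, real_photos
--     """
--     ordered = sorted((img for img in image_list if img["source"] == "thermal"),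
--                      key=lambda img: img["page"])
--
--     thermal_maps = []
--     real_photos = []
--     prev = None
--     count = 0
--     for img in ordered:
--         p = img["page"]
--         if prev != p:
--             prev = p
--             count = 0
--         count += 1
--         if count == 1:
--             thermal_maps.append(img)
--         elif count == 2:
--             real_photos.append(img)
--     return thermal_maps, real_photos
-- ===== Notes on version B (the rewrite author's own statement) =====
-- stated objective: alternative
-- what changed: Replaces A's dict-grouping index (build page->list dict, sort its keys, index back into the dict) by a stable sort of the thermal images on their page key followed by a single consecutive-run scan with a prev/count accumulator; KeyError-raising inputs (an image without 'source', or a thermal image without 'page') are outside Pre_.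
import Mathlib
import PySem

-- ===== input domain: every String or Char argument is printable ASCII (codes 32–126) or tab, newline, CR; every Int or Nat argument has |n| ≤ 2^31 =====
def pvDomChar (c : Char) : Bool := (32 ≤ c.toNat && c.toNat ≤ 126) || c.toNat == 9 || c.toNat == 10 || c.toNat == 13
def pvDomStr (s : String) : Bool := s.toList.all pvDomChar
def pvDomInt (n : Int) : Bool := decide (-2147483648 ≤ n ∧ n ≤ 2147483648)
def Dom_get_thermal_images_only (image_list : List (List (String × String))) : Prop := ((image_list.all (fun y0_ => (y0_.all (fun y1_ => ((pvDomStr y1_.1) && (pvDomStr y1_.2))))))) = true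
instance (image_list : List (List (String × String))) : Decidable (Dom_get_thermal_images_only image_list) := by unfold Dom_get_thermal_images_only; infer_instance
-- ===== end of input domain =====

-- B drops A's dict-grouping index: it stably sorts the thermal images by page and makes one
-- consecutive-run scan with a prev/count accumulator (an alternative decomposition; not claimed faster).

-- ===== PORT A =====
-- shared helper: img[k] for an image dict, totalised with ""; exact wherever the key exists (Pre_)
def pvLookup (img : List (String × String)) (k : String) : String :=
  PySem.Dict.getD (PySem.Dict.mk img) k ""

def get_thermal_images_only (image_list : List (List (String × String))) : (List (List (String × String))) × (List (List (String × String))) :=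
  let thermal_images := image_list.filter (fun img => pvLookup img "source" == "thermal")
  let pages : PySem.Dict String (List (List (String × String))) :=
    thermal_images.foldl
      (fun pages img =>
        let p := pvLookup img "page"
        let pages := if pages.contains p then pages else pages.insert p []
        pages.modify p [] (fun v => v ++ [img]))
      (PySem.Dict.mk [])
  (PySem.List.sorted pages.keys (fun x => x) false).foldl
    (fun acc page_num =>
      let imgs := pages.getD page_num []
      let tm := if 1 ≤ imgs.length then acc.1 ++ (PySem.List.pyGet? imgs 0).toList else acc.1
      let rp := if 2 ≤ imgs.length then acc.2 ++ (PySem.List.pyGet? imgs 1).toList else acc.2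
      (tm, rp))
    ([], [])

-- ===== PORT B =====
-- the loop body of B's consecutive-run scan: state = (thermal_maps, real_photos, prev, count)
def pvStepB (st : (List (List (String × String))) × (List (List (String × String))) × Option String × Nat)
    (img : List (String × String)) :
    (List (List (String × String))) × (List (List (String × String))) × Option String × Nat :=
  let p := pvLookup img "page"
  let pc := if st.2.2.1 ≠ some p then (some p, 0) else (st.2.2.1, st.2.2.2)
  let count := pc.2 + 1
  if count = 1 then (st.1 ++ [img], st.2.1, pc.1, count)
  else if count = 2 then (st.1, st.2.1 ++ [img], pc.1, count)
  else (st.1, st.2.1, pc.1, count)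

def get_thermal_images_only_alt (image_list : List (List (String × String))) : (List (List (String × String))) × (List (List (String × String))) :=
  let ordered := PySem.List.sorted (image_list.filter (fun img => pvLookup img "source" == "thermal"))
      (fun img => pvLookup img "page") false
  let st := ordered.foldl pvStepB ([], [], none, 0)
  (st.1, st.2.1)

-- ===== PRECONDITION & SPEC =====
-- Pre_ excludes exactly the inputs on which the Python A raises KeyError: an image without a
-- "source" key, or a thermal image without a "page" key.
def Pre_get_thermal_images_only (image_list : List (List (String × String))) : Prop :=
  ∀ img ∈ image_list, (PySem.Dict.mk img).contains "source" = true ∧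
    ((PySem.Dict.mk img).getD "source" "" = "thermal" → (PySem.Dict.mk img).contains "page" = true)
instance (image_list : List (List (String × String))) : Decidable (Pre_get_thermal_images_only image_list) := by unfold Pre_get_thermal_images_only; infer_instance

def pvWitness_get_thermal_images_only : (List (List (String × String))) :=
  [[("source", "thermal"), ("page", "1")], [("source", "photo")]]

def Spec_get_thermal_images_only (image_list : List (List (String × String))) (out : (List (List (String × String))) × (List (List (String × String)))) : Prop := out = get_thermal_images_only_alt image_list
instance (image_list : List (List (String × String))) (out : (List (List (String × String))) × (List (List (String × String)))) : Decidable (Spec_get_thermal_images_only image_list out) := by unfold Spec_get_thermal_images_only; infer_instance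

-- ===== CLAIM (what is proved, stated in full; the proofs are below) =====
def Claim_equal_get_thermal_images_only : Prop := ∀ (image_list : List (List (String × String))), Dom_get_thermal_images_only image_list → Pre_get_thermal_images_only image_list → Spec_get_thermal_images_only image_list (get_thermal_images_only image_list)

-- ===== LEMMAS AND PROOFS =====

-- A's grouping step over one image (the body of A's dict-building fold, named for the lemmas)
def pvStepA (pages : PySem.Dict String (List (List (String × String)))) (img : List (String × String)) : PySem.Dict String (List (List (String × String))) :=
  let p := pvLookup img "page"
  let pages := if pages.contains p then pages else pages.insert p []
  pages.modify p [] (fun v => v ++ [img])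

lemma pvStepA_getD (d : PySem.Dict String (List (List (String × String)))) (img : List (String × String)) (p : String) :
    (pvStepA d img).getD p [] =
      d.getD p [] ++ (if pvLookup img "page" == p then [img] else []) := by
  unfold pvStepA
  set q := pvLookup img "page" with hq
  by_cases hc : d.contains q = true
  · simp only [hc, if_true]
    rw [PySem.Dict.getD_modify]
    by_cases hpq : p = q
    · subst hpq; simp
    · simp [hpq, Ne.symm hpq]
  · simp only [Bool.not_eq_true] at hc
    simp only [hc, Bool.false_eq_true, if_false]
    rw [PySem.Dict.getD_modify]
    by_cases hpq : p = q
    · subst hpq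
      simp [PySem.Dict.getD_of_not_contains d _ hc]
    · simp [hpq, Ne.symm hpq, PySem.Dict.getD_insert]

lemma pvStepA_keys (d : PySem.Dict String (List (List (String × String)))) (img : List (String × String)) :
    (pvStepA d img).keys = PySem.Set.add d.keys (pvLookup img "page") := by
  unfold pvStepA
  set q := pvLookup img "page" with hq
  by_cases hc : d.contains q = true
  · have hm : q ∈ d.keys := (PySem.Dict.contains_iff_mem_keys d q).mp hc
    simp only [hc, if_true]
    rw [PySem.Dict.keys_modify, PySem.Dict.keys_insert_of_contains d _ hc]
    simp [PySem.Set.add, hm]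
  · simp only [Bool.not_eq_true] at hc
    have hm : q ∉ d.keys := by
      intro h
      rw [← PySem.Dict.contains_iff_mem_keys d q] at h
      simp [hc] at h
    simp only [hc, Bool.false_eq_true, if_false]
    rw [PySem.Dict.keys_modify,
        PySem.Dict.keys_insert_of_contains _ _ (PySem.Dict.contains_insert_self d q []),
        PySem.Dict.keys_insert_of_not_contains d _ hc]
    simp [PySem.Set.add, hm]

lemma pvPages_getD (ts : List (List (String × String))) (d : PySem.Dict String (List (List (String × String)))) (p : String) :
    (ts.foldl pvStepA d).getD p [] =
      d.getD p [] ++ ts.filter (fun img => pvLookup img "page" == p) := by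
  induction ts generalizing d with
  | nil => simp
  | cons img ts ih =>
    simp only [List.foldl_cons, List.filter_cons, ih, pvStepA_getD]
    by_cases h : (pvLookup img "page" == p) = true <;> simp [h]

lemma pvPages_keys (ts : List (List (String × String))) :
    (ts.foldl pvStepA (PySem.Dict.mk [])).keys
      = PySem.Set.ofList (ts.map (fun img => pvLookup img "page")) := by
  have h : ∀ (d : PySem.Dict String (List (List (String × String)))),
      (ts.foldl pvStepA d).keys = ts.foldl (fun s img => PySem.Set.add s (pvLookup img "page")) d.keys := by
    induction ts with
    | nil => intro d; rfl
    | cons img ts ih => intro d; simp only [List.foldl_cons, ih, pvStepA_keys]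
  rw [h (PySem.Dict.mk []), PySem.Set.ofList_eq_foldl, List.foldl_map]
  rfl

-- A's length-guarded head append is B's unguarded one (the head option is empty exactly when the guard fails)
lemma pvHead_append (xs : List (List (String × String))) (acc : List (List (String × String))) :
    (if 1 ≤ xs.length then acc ++ (PySem.List.pyGet? xs 0).toList else acc)
      = acc ++ (PySem.List.pyGet? xs 0).toList := by
  cases xs <;> simp [PySem.List.pyGet?_zero]

-- ---- stable-sort decomposition: sorted-by-key = sorted distinct keys, groups concatenated ----

lemma pvInsertBy_all_before {α : Type} (before : α → α → Bool) (x : α) (l : List α)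
    (h : ∀ y ∈ l, before x y = true) :
    PySem.List.insertBy before x l = x :: l := by
  cases l with
  | nil => rfl
  | cons y ys => simp [PySem.List.insertBy, h y (by simp)]

lemma pvInsertBy_append_not_before {α : Type} (before : α → α → Bool) (x : α) (as bs : List α)
    (h : ∀ a ∈ as, before x a = false) :
    PySem.List.insertBy before x (as ++ bs) = as ++ PySem.List.insertBy before x bs := by
  induction as with
  | nil => rfl
  | cons a as ih =>
    simp only [List.cons_append, PySem.List.insertBy, h a (by simp)]
    simp only [Bool.false_eq_true, if_false, List.cons.injEq, true_and]
    exact ih (fun a ha => h a (by simp [ha]))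

-- inserting x whose key already occurs in the strictly increasing key list: x joins its group
lemma pvIns_mem {α : Type} (key : α → String) (x : α) (k : String) (hk : key x = k)
    (ks : List String) (g : String → List α)
    (hsort : ks.Pairwise (· < ·)) (hmem : k ∈ ks)
    (hg : ∀ k' ∈ ks, ∀ y ∈ g k', key y = k') :
    PySem.List.insertBy (fun a b => decide (key a < key b)) x (ks.flatMap g)
      = ks.flatMap (fun k' => if k' = k then g k' ++ [x] else g k') := by
  induction ks with
  | nil => simp at hmem
  | cons k0 ks ih =>
    rcases List.pairwise_cons.mp hsort with ⟨hlt, htail⟩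
    by_cases hk0 : k0 = k
    · subst hk0
      rw [List.flatMap_cons,
        pvInsertBy_append_not_before _ _ _ _
          (fun a ha => by simp [hk, hg k0 (by simp) a ha]),
        pvInsertBy_all_before _ _ _
          (fun y hy => by
            rcases List.mem_flatMap.mp hy with ⟨k', hk', hy'⟩
            simp [hk, hg k' (by simp [hk']) y hy', hlt k' hk']),
        List.flatMap_cons]
      have hrest : ks.flatMap (fun k' => if k' = k0 then g k' ++ [x] else g k') = ks.flatMap g :=
        List.flatMap_congr (fun k' hk' => by
          have : k' ≠ k0 := by intro h; exact absurd (h ▸ hlt k' hk') (lt_irrefl _)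
          simp [this])
      simp [hrest]
    · have hmem' : k ∈ ks := by
        rcases List.mem_cons.mp hmem with h | h
        · exact absurd h.symm hk0
        · exact h
      have hk0k : k0 < k := hlt k hmem'
      rw [List.flatMap_cons,
        pvInsertBy_append_not_before _ _ _ _
          (fun a ha => by
            rw [hk, hg k0 (by simp) a ha]
            exact decide_eq_false (lt_asymm hk0k)),
        ih htail hmem' (fun k' hk' y hy => hg k' (by simp [hk']) y hy),
        List.flatMap_cons]
      simp [hk0]

-- inserting x with a fresh key: the key is inserted into the key list, x is its singleton group
lemma pvIns_new {α : Type} (key : α → String) (x : α) (k : String) (hk : key x = k)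
    (ks : List String) (g : String → List α)
    (hsort : ks.Pairwise (· < ·)) (hnot : k ∉ ks)
    (hg : ∀ k' ∈ ks, ∀ y ∈ g k', key y = k') (hempty : g k = []) :
    PySem.List.insertBy (fun a b => decide (key a < key b)) x (ks.flatMap g)
      = (PySem.List.insertBy (fun a b => decide (a < b)) k ks).flatMap
          (fun k' => if k' = k then g k' ++ [x] else g k') := by
  induction ks with
  | nil => simp [PySem.List.insertBy, hempty]
  | cons k0 ks ih =>
    rcases List.pairwise_cons.mp hsort with ⟨hlt, htail⟩
    have hne : k ≠ k0 := by intro h; exact hnot (by simp [h])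
    rcases lt_or_gt_of_ne hne with hlt0 | hgt0
    · rw [pvInsertBy_all_before _ _ _
          (fun y hy => by
            rcases List.mem_flatMap.mp hy with ⟨k', hk', hy'⟩
            have hkey := hg k' hk' y hy'
            rw [hk, hkey]
            rcases List.mem_cons.mp hk' with h | h
            · exact decide_eq_true (h ▸ hlt0)
            · exact decide_eq_true (lt_trans hlt0 (hlt k' h))),
        show PySem.List.insertBy (fun a b => decide (a < b)) k (k0 :: ks) = k :: k0 :: ks by
          simp [PySem.List.insertBy, hlt0]]
      rw [List.flatMap_cons, List.flatMap_cons (f := fun k' => if k' = k then g k' ++ [x] else g k')]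
      have hrest : (k0 :: ks).flatMap (fun k' => if k' = k then g k' ++ [x] else g k')
          = (k0 :: ks).flatMap g :=
        List.flatMap_congr (fun k' hk' => by
          have : k' ≠ k := by intro h; exact hnot (h ▸ hk')
          simp [this])
      simp [hempty, hrest]
    · rw [List.flatMap_cons,
        pvInsertBy_append_not_before _ _ _ _
          (fun a ha => by
            rw [hk, hg k0 (by simp) a ha]
            exact decide_eq_false (lt_asymm hgt0)),
        ih htail (fun h => hnot (by simp [h])) (fun k' hk' y hy => hg k' (by simp [hk']) y hy),
        show PySem.List.insertBy (fun a b => decide (a < b)) k (k0 :: ks)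
            = k0 :: PySem.List.insertBy (fun a b => decide (a < b)) k ks by
          simp [PySem.List.insertBy, not_lt_of_gt hgt0],
        List.flatMap_cons]
      simp [Ne.symm hne]

-- sorted(xs, key) is the concatenation, over the sorted distinct keys, of the per-key filters
lemma pvSortdec {α : Type} (xs : List α) (key : α → String) :
    PySem.List.sorted xs key false
      = (PySem.List.sorted (PySem.Set.ofList (xs.map key)) (fun x => x) false).flatMap
          (fun k => xs.filter (fun y => key y == k)) := by
  induction xs using List.reverseRecOn with
  | nil => rfl
  | append_singleton xs x ih =>
    have hL : PySem.List.sorted (xs ++ [x]) key false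
        = PySem.List.insertBy (fun a b => decide (key a < key b)) x (PySem.List.sorted xs key false) := by
      rw [PySem.List.sorted_eq_foldl_insertBy, PySem.List.sorted_eq_foldl_insertBy, List.foldl_append]
      rfl
    have hofl : PySem.Set.ofList ((xs ++ [x]).map key)
        = PySem.Set.add (PySem.Set.ofList (xs.map key)) (key x) := by
      rw [List.map_append, PySem.Set.ofList_eq_foldl, List.foldl_append, ← PySem.Set.ofList_eq_foldl]
      rfl
    have hg : ∀ k' ∈ PySem.List.sorted (PySem.Set.ofList (xs.map key)) (fun x => x) false,
        ∀ y ∈ xs.filter (fun y => key y == k'), key y = k' := by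
      intro k' _ y hy
      exact eq_of_beq (List.mem_filter.mp hy).2
    have hfilt : ∀ k' : String, (xs ++ [x]).filter (fun y => key y == k')
        = (xs.filter (fun y => key y == k')) ++ (if k' = key x then [x] else []) := by
      intro k'
      rw [List.filter_append]
      by_cases h : k' = key x
      · simp [h]
      · simp [Ne.symm h, beq_iff_eq, h]
    by_cases hmem : key x ∈ PySem.Set.ofList (xs.map key)
    · have hadd : PySem.Set.add (PySem.Set.ofList (xs.map key)) (key x)
          = PySem.Set.ofList (xs.map key) := by
        simp [PySem.Set.add, PySem.Set.contains, hmem]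
      rw [hL, ih,
        pvIns_mem key x (key x) rfl _ _ (PySem.List.sorted_ofList_pairwise_lt _)
          ((PySem.List.mem_sorted _ _ _ _).mpr hmem) hg,
        hofl, hadd]
      exact (List.flatMap_congr (fun k' hk' => by rw [hfilt k']; by_cases h : k' = key x <;> simp [h])).symm
    · have hadd : PySem.Set.add (PySem.Set.ofList (xs.map key)) (key x)
          = PySem.Set.ofList (xs.map key) ++ [key x] := by
        simp [PySem.Set.add, PySem.Set.contains, hmem]
      have hins : PySem.List.sorted (PySem.Set.ofList (xs.map key) ++ [key x]) (fun x => x) false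
          = PySem.List.insertBy (fun a b => decide (a < b)) (key x)
              (PySem.List.sorted (PySem.Set.ofList (xs.map key)) (fun x => x) false) := by
        rw [PySem.List.sorted_eq_foldl_insertBy, PySem.List.sorted_eq_foldl_insertBy, List.foldl_append]
        rfl
      have hempty : xs.filter (fun y => key y == key x) = [] := by
        rw [List.filter_eq_nil_iff]
        intro y hy hbeq
        exact hmem ((PySem.Set.mem_ofList _ _).mpr (List.mem_map.mpr ⟨y, hy, eq_of_beq hbeq⟩))
      rw [hL, ih,
        pvIns_new key x (key x) rfl _ _ (PySem.List.sorted_ofList_pairwise_lt _)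
          (fun h => hmem ((PySem.List.mem_sorted _ _ _ _).mp h)) hg hempty,
        hofl, hadd, hins]
      exact (List.flatMap_congr (fun k' hk' => by rw [hfilt k']; by_cases h : k' = key x <;> simp [h])).symm

-- ---- the consecutive-run scan over a grouped list ----

-- the per-run result of B's fold, as A computes it: append the run's first (and second) element
def pvMStep (g : String → List (List (String × String)))
    (acc : (List (List (String × String))) × (List (List (String × String)))) (k : String) :
    (List (List (String × String))) × (List (List (String × String))) :=
  (acc.1 ++ (PySem.List.pyGet? (g k) 0).toList,
   if 2 ≤ (g k).length then acc.2 ++ (PySem.List.pyGet? (g k) 1).toList else acc.2)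

lemma pvRun2 (t : List (List (String × String))) (k : String)
    (h : ∀ y ∈ t, pvLookup y "page" = k) (tm rp : List (List (String × String))) (c : Nat) (hc : 2 ≤ c) :
    t.foldl pvStepB (tm, rp, some k, c) = (tm, rp, some k, c + t.length) := by
  induction t generalizing c with
  | nil => simp
  | cons y t ih =>
    have hy : pvLookup y "page" = k := h y (by simp)
    rw [List.foldl_cons,
      show pvStepB (tm, rp, some k, c) y = (tm, rp, some k, c + 1) by
        have h1 : ¬ (c = 0) := by omega
        have h2 : ¬ (c = 1) := by omega
        simp [pvStepB, hy, h1, h2],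
      ih (fun y hy => h y (by simp [hy])) (c + 1) (by omega)]
    simp; omega

lemma pvRun (l : List (List (String × String))) (k : String) (hne : l ≠ [])
    (h : ∀ y ∈ l, pvLookup y "page" = k) (tm rp : List (List (String × String)))
    (p0 : Option String) (c : Nat) (hp : p0 ≠ some k) :
    l.foldl pvStepB (tm, rp, p0, c)
      = (tm ++ (PySem.List.pyGet? l 0).toList,
         (if 2 ≤ l.length then rp ++ (PySem.List.pyGet? l 1).toList else rp),
         some k, l.length) := by
  cases l with
  | nil => exact absurd rfl hne
  | cons a t =>
    have ha : pvLookup a "page" = k := h a (by simp)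
    rw [List.foldl_cons,
      show pvStepB (tm, rp, p0, c) a = (tm ++ [a], rp, some k, 1) by
        simp [pvStepB, ha, hp]]
    cases t with
    | nil => simp [PySem.List.pyGet?, PySem.List.pyIdx?]
    | cons b t =>
      have hb : pvLookup b "page" = k := h b (by simp)
      rw [List.foldl_cons,
        show pvStepB (tm ++ [a], rp, some k, 1) b = (tm ++ [a], rp ++ [b], some k, 2) by
          simp [pvStepB, hb],
        pvRun2 t k (fun y hy => h y (by simp [hy])) _ _ 2 (by omega)]
      simp [PySem.List.pyGet?, PySem.List.pyIdx?,
        show (0:Int) ≤ (t.length:Int) + 1 from by positivity]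
      omega

lemma pvScan (ks : List String) (g : String → List (List (String × String)))
    (hsort : ks.Pairwise (· < ·))
    (hg : ∀ k ∈ ks, g k ≠ [] ∧ ∀ y ∈ g k, pvLookup y "page" = k)
    (tm rp : List (List (String × String))) (p0 : Option String) (c : Nat)
    (hp : ∀ k ∈ ks, p0 ≠ some k) :
    ((ks.flatMap g).foldl pvStepB (tm, rp, p0, c)).1 = (ks.foldl (pvMStep g) (tm, rp)).1
    ∧ ((ks.flatMap g).foldl pvStepB (tm, rp, p0, c)).2.1 = (ks.foldl (pvMStep g) (tm, rp)).2 := by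
  induction ks generalizing tm rp p0 c with
  | nil => simp
  | cons k ks ih =>
    rcases List.pairwise_cons.mp hsort with ⟨hlt, htail⟩
    rcases hg k (by simp) with ⟨hne, hkey⟩
    rw [List.flatMap_cons, List.foldl_append,
      pvRun (g k) k hne hkey tm rp p0 c (hp k (by simp)), List.foldl_cons]
    exact ih htail (fun k' hk' => ⟨(hg k' (by simp [hk'])).1, (hg k' (by simp [hk'])).2⟩)
      _ _ _ _ (fun k' hk' => by
        intro hcon
        injection hcon with hcon
        exact absurd (hcon ▸ hlt k' hk') (lt_irrefl _))

-- ===== VERDICT (by name: the statement is the Claim_ definition above) =====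
theorem get_thermal_images_only_spec : Claim_equal_get_thermal_images_only := by
  intro L _ _
  unfold Spec_get_thermal_images_only get_thermal_images_only get_thermal_images_only_alt
  rw [show (fun (pages : PySem.Dict String (List (List (String × String)))) (img : List (String × String)) =>
        let p := pvLookup img "page";
        let pages := if pages.contains p then pages else pages.insert p [];
        pages.modify p [] (fun v => v ++ [img])) = pvStepA from rfl]
  have h0 : ∀ p : String, (PySem.Dict.mk ([] : List (String × List (List (String × String))))).getD p [] = [] := fun _ => rfl
  set ts := L.filter (fun img => pvLookup img "source" == "thermal") with hts
  set g : String → List (List (String × String)) := fun k => ts.filter (fun y => pvLookup y "page" == k) with hgdef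
  set ks := PySem.List.sorted (PySem.Set.ofList (ts.map (fun img => pvLookup img "page"))) (fun x => x) false with hks
  have hg : ∀ k ∈ ks, g k ≠ [] ∧ ∀ y ∈ g k, pvLookup y "page" = k := by
    intro k hk
    constructor
    · have hk' : k ∈ ts.map (fun img => pvLookup img "page") := by
        rw [hks] at hk
        exact (PySem.Set.mem_ofList _ _).mp ((PySem.List.mem_sorted _ _ _ _).mp hk)
      rcases List.mem_map.mp hk' with ⟨y, hy, hyk⟩
      intro hnil
      have : y ∈ g k := List.mem_filter.mpr ⟨hy, by simp [hyk]⟩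
      simp [hnil] at this
    · intro y hy
      exact eq_of_beq (List.mem_filter.mp hy).2
  have hscan := pvScan ks g (hks ▸ PySem.List.sorted_ofList_pairwise_lt _) hg [] [] none 0
    (fun k _ => by simp)
  rcases hscan with ⟨h1, h2⟩
  simp only [pvPages_keys, pvPages_getD, h0, List.nil_append]
  rw [pvSortdec ts (fun img => pvLookup img "page")]
  simp only [pvHead_append]
  exact Prod.ext h1.symm h2.symm
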